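-- pv_equiv track=rewrite | github.com/maguas01/hackerRank | pStuff/ Birthday_Chocolate.py | solve
-- ===== SOURCE A (Python) =====
-- def solve(n, s, d, m):
--     count = 0
--     for i in range (0, len(s) - m + 1 ) :
--         sum = 0
--         for j in range(i, i + m ) :
--             sum += s[j]
--         if sum == d :
--             count += 1
--     return count
-- ===== SOURCE B (Python) =====
-- def solve(n, s, d, m):
--     # prefix sums once, then each window sum is one subtraction: O(n) instead of O(n*m)
--     prefix = [0]
--     total = 0
--     for x in s:
--         total += x
--         prefix.append(total)
--     count = 0
--     for i in range(len(s) - m + 1):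
--         if prefix[i + m] - prefix[i] == d:
--             count += 1
--     return count
-- ===== Notes on version B (the rewrite author's own statement) =====
-- stated objective: faster
-- what changed: replaces the inner re-summation loop over each window with a prefix-sum array built once, so each window sum becomes a single subtraction
-- outside the precondition, e.g. on solve(0, [], 0, -1): A returns 2, B raises IndexError
import Mathlib
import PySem

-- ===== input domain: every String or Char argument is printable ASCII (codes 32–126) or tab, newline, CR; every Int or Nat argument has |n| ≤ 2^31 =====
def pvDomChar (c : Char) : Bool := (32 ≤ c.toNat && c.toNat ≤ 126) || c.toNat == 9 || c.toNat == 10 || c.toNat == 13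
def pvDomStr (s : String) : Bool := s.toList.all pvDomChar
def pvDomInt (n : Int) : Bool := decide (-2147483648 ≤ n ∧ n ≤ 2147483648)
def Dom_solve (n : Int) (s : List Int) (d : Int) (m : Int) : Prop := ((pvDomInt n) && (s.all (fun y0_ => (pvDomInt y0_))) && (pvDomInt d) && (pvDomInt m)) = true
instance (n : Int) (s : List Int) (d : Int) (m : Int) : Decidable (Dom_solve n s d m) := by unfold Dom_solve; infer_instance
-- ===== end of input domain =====

-- B replaces A's inner per-window re-summation with a prefix-sum array built once (objective: faster, asymptotic).


-- ===== PORT A =====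
def solve (n : Int) (s : List Int) (d : Int) (m : Int) : Int :=
  (PySem.List.pyRange 0 (PySem.List.len s - m + 1) 1).foldl
    (fun count i =>
      let sum := (PySem.List.pyRange i (i + m) 1).foldl
        (fun acc j => acc + PySem.List.pyGetD s j 0) 0
      if sum = d then count + 1 else count) 0

-- ===== PORT B =====
def solve_alt (n : Int) (s : List Int) (d : Int) (m : Int) : Int :=
  let pr := (s.foldl (fun (st : List Int × Int) x => (st.1 ++ [st.2 + x], st.2 + x)) ([0], 0)).1
  (PySem.List.pyRange 0 (PySem.List.len s - m + 1) 1).foldl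
    (fun count i =>
      if PySem.List.pyGetD pr (i + m) 0 - PySem.List.pyGetD pr i 0 = d then count + 1 else count) 0

-- ===== PRECONDITION & SPEC =====
-- Pre_ restricts to the task's natural domain: m is a window length, so 0 ≤ m.
-- For m < 0 A returns an accidental count of empty windows while B's prefix indexing raises IndexError.
def Pre_solve (n : Int) (s : List Int) (d : Int) (m : Int) : Prop := 0 ≤ m
instance (n : Int) (s : List Int) (d : Int) (m : Int) : Decidable (Pre_solve n s d m) := by unfold Pre_solve; infer_instance
def pvWitness_solve : Int × List Int × Int × Int := (5, [1, 2, 1, 3, 2], 3, 2)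
def Spec_solve (n : Int) (s : List Int) (d : Int) (m : Int) (out : Int) : Prop := out = solve_alt n s d m
instance (n : Int) (s : List Int) (d : Int) (m : Int) (out : Int) : Decidable (Spec_solve n s d m out) := by unfold Spec_solve; infer_instance

-- ===== CLAIM (what is proved, stated in full; the proofs are below) =====
def Claim_equal_solve : Prop := ∀ (n : Int) (s : List Int) (d : Int) (m : Int), Dom_solve n s d m → Pre_solve n s d m → Spec_solve n s d m (solve n s d m)

-- ===== LEMMAS AND PROOFS =====

-- Characterisation of B's prefix-building fold.
theorem prefix_fold_eq (s : List Int) (acc : List Int) (t : Int) :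
    s.foldl (fun (st : List Int × Int) x => (st.1 ++ [st.2 + x], st.2 + x)) (acc, t)
      = (acc ++ (List.range s.length).map (fun k => t + ((s.take (k + 1)).sum)), t + s.sum) := by
  induction s generalizing acc t with
  | nil => simp
  | cons x s ih =>
    simp only [List.foldl_cons, ih (acc ++ [t + x]) (t + x), List.length_cons,
      List.range_succ_eq_map, List.map_cons, List.map_map, List.sum_cons]
    simp only [Prod.mk.injEq]
    refine ⟨?_, by ring⟩
    simp only [List.append_assoc, List.cons_append, List.nil_append, List.take_succ_cons,
      List.sum_cons, List.take_zero, List.sum_nil, add_zero]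
    congr 1
    congr 1
    apply List.map_congr_left
    intro k _
    simp [Function.comp, Nat.succ_eq_add_one]
    ring

-- Entry j of the prefix list is the sum of the first j elements (for j ≤ length).
theorem prefix_getD (s : List Int) (j : Nat) (hj : j ≤ s.length) :
    PySem.List.pyGetD
      ((s.foldl (fun (st : List Int × Int) x => (st.1 ++ [st.2 + x], st.2 + x)) ([0], 0)).1)
      (j : Int) 0 = (s.take j).sum := by
  rw [prefix_fold_eq]
  rw [PySem.List.pyGetD_natCast]
  cases j with
  | zero => simp
  | succ k =>
    have hk : k < s.length := by omega
    simp [List.getD_eq_getElem?_getD, hk]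

-- A's inner window loop equals a difference of prefix sums.
theorem window_sum (s : List Int) (i m : Nat) (h : i + m ≤ s.length) :
    (PySem.List.pyRange (i : Int) ((i : Int) + (m : Int)) 1).foldl
        (fun acc j => acc + PySem.List.pyGetD s j 0) 0
      = (s.take (i + m)).sum - (s.take i).sum := by
  have hlen : (s.take (i + m)).length = i + m := by simp [List.length_take]; omega
  have hrange : (PySem.List.pyRange (i : Int) ((i : Int) + (m : Int)) 1)
      = PySem.List.pyRange (i : Int) (PySem.List.len (s.take (i + m))) 1 := by
    simp [PySem.List.len, hlen]
  rw [hrange]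
  rw [PySem.List.foldl_congr_mem _ _
      (fun acc j => acc + PySem.List.pyGetD (s.take (i + m)) j 0) _ ?_]
  · rw [PySem.List.foldl_pyRange_pyGetD (s.take (i + m)) 0 (fun acc x => acc + x) 0 (by positivity)]
    rw [PySem.List.foldl_add _ (fun x => x) _]
    have hsd := List.sum_take_add_sum_drop (s.take (i + m)) i
    have htt : (s.take (i + m)).take i = s.take i := by
      rw [List.take_take]; congr 1; omega
    have hnat : ((i : Int)).toNat = i := by simp
    rw [hnat]
    simp only [List.map_id_fun', id]
    rw [htt] at hsd
    linarith
  · intro acc x hx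
    rw [PySem.List.mem_pyRange_one] at hx
    simp only [PySem.List.len] at hx
    show acc + PySem.List.pyGetD s x 0 = acc + PySem.List.pyGetD (s.take (i + m)) x 0
    have h0 : (0 : Int) ≤ x := le_trans (Int.natCast_nonneg i) hx.1
    have h1 : x < ((s.take (i + m)).length : Int) := by exact_mod_cast hx.2
    have h2 : x < (s.length : Int) := by rw [hlen] at h1; push_cast at h1 ⊢; omega
    rw [PySem.List.pyGetD_eq_getElem s 0 h0 h2,
        PySem.List.pyGetD_eq_getElem _ 0 h0 h1, List.getElem_take]

-- ===== VERDICT (by name: the statement is the Claim_ definition above) =====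
theorem solve_spec : Claim_equal_solve := by
  intro n s d m _ hpre
  unfold Spec_solve solve solve_alt
  apply PySem.List.foldl_congr_mem
  intro acc i hi
  rw [PySem.List.mem_pyRange_one] at hi
  obtain ⟨hi0, hi1⟩ := hi
  have hm0 : (0 : Int) ≤ m := hpre
  have hlen : PySem.List.len s = (s.length : Int) := by simp [PySem.List.len]
  rw [hlen] at hi1
  -- name the bounds as Nats
  have hiN : i = ((i.toNat : Nat) : Int) := by omega
  have hmN : m = ((m.toNat : Nat) : Int) := by omega
  have hbound : i.toNat + m.toNat ≤ s.length := by omega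
  have hwin : (PySem.List.pyRange i (i + m) 1).foldl
      (fun acc j => acc + PySem.List.pyGetD s j 0) 0
      = (s.take (i.toNat + m.toNat)).sum - (s.take i.toNat).sum := by
    rw [hiN, hmN]; exact window_sum s i.toNat m.toNat hbound
  have hpr1 : PySem.List.pyGetD
      ((s.foldl (fun (st : List Int × Int) x => (st.1 ++ [st.2 + x], st.2 + x)) ([0], 0)).1)
      (i + m) 0 = (s.take (i.toNat + m.toNat)).sum := by
    have : i + m = (((i.toNat + m.toNat : Nat)) : Int) := by push_cast; omega
    rw [this]; exact prefix_getD s _ hbound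
  have hpr2 : PySem.List.pyGetD
      ((s.foldl (fun (st : List Int × Int) x => (st.1 ++ [st.2 + x], st.2 + x)) ([0], 0)).1)
      i 0 = (s.take i.toNat).sum := by
    rw [hiN]; exact prefix_getD s _ (by omega)
  simp only [hwin, hpr1, hpr2]
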